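-- pv_equiv track=rewrite | github.com/DinsonDamienWBD/DataWarehouse | .planning/migrate_concurrent_dict.py | get_capacity
-- ===== SOURCE A (Python) =====
-- def get_capacity(field_name):
--     name = field_name.lower()
--     if any(k in name for k in ["metric", "counter", "stat", "monitor", "perf", "telemetry", "analytics"]):
--         return 5000
--     if any(k in name for k in ["cache", "index", "store", "data", "entries", "record", "block", "chunk"]):
--         return 10000
--     if any(k in name for k in ["session", "connection", "client", "peer", "node", "member", "subscription", "subscriber", "limiter"]):
--         return 1000
--     if any(k in name for k in ["strategy", "registry", "handler", "processor", "provider", "factory", "resolver", "plugin"]):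
--         return 200
--     if any(k in name for k in ["config", "setting", "option", "param", "feature", "toggle", "policy", "rule", "tenant"]):
--         return 500
--     if any(k in name for k in ["job", "task", "queue", "pending", "active", "running", "scheduled"]):
--         return 1000
--     return 1000
-- ===== SOURCE B (Python) =====
-- # Flat keyword -> (priority, capacity) map; one pass keeping the best (minimal-priority) match.
-- KEYWORD_INFO = {}
-- for _prio, (_kws, _cap) in enumerate([
--     (["metric", "counter", "stat", "monitor", "perf", "telemetry", "analytics"], 5000),
--     (["cache", "index", "store", "data", "entries", "record", "block", "chunk"], 10000),
--     (["session", "connection", "client", "peer", "node", "member", "subscription", "subscriber", "limiter"], 1000),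
--     (["strategy", "registry", "handler", "processor", "provider", "factory", "resolver", "plugin"], 200),
--     (["config", "setting", "option", "param", "feature", "toggle", "policy", "rule", "tenant"], 500),
--     (["job", "task", "queue", "pending", "active", "running", "scheduled"], 1000),
-- ]):
--     for _k in _kws:
--         KEYWORD_INFO[_k] = (_prio, _cap)
--
-- def get_capacity(field_name):
--     name = field_name.lower()
--     best = None
--     for k, tc in KEYWORD_INFO.items():
--         if k in name and (best is None or tc[0] < best[0]):
--             best = tc
--     return best[1] if best is not None else 1000
-- ===== Notes on version B (the rewrite author's own statement) =====
-- stated objective: alternative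
-- what changed: Instead of six ordered if/any branch blocks with early returns, B flattens all keywords into one keyword->(priority,capacity) map and makes a single pass over it keeping the minimal-priority match, returning its capacity (default 1000).
import Mathlib
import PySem

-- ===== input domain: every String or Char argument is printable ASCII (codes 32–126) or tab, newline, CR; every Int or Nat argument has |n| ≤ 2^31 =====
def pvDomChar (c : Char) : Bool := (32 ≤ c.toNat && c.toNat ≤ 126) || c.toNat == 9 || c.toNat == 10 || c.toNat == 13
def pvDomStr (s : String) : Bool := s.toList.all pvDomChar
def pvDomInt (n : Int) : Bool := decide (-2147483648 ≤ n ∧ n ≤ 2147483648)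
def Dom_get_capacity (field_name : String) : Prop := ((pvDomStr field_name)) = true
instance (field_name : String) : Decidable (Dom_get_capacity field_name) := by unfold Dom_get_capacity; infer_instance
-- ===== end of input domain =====

-- B replaces the six ordered early-return branch blocks with one pass over a flat keyword->(priority,capacity) map keeping the minimal-priority match (objective: alternative).
-- ===== PORT A =====
def get_capacity (field_name : String) : Int :=
  let name := PySem.Str.lower field_name
  if ["metric", "counter", "stat", "monitor", "perf", "telemetry", "analytics"].any (fun k => PySem.Str.isIn k name) then 5000
  else if ["cache", "index", "store", "data", "entries", "record", "block", "chunk"].any (fun k => PySem.Str.isIn k name) then 10000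
  else if ["session", "connection", "client", "peer", "node", "member", "subscription", "subscriber", "limiter"].any (fun k => PySem.Str.isIn k name) then 1000
  else if ["strategy", "registry", "handler", "processor", "provider", "factory", "resolver", "plugin"].any (fun k => PySem.Str.isIn k name) then 200
  else if ["config", "setting", "option", "param", "feature", "toggle", "policy", "rule", "tenant"].any (fun k => PySem.Str.isIn k name) then 500
  else if ["job", "task", "queue", "pending", "active", "running", "scheduled"].any (fun k => PySem.Str.isIn k name) then 1000
  else 1000

-- ===== PORT B =====
-- flat keyword -> (priority, capacity) association list, in Source B's insertion order
def pvKeywordInfo : List (String × Int × Int) :=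
  [("metric", 0, 5000), ("counter", 0, 5000), ("stat", 0, 5000), ("monitor", 0, 5000),
   ("perf", 0, 5000), ("telemetry", 0, 5000), ("analytics", 0, 5000),
   ("cache", 1, 10000), ("index", 1, 10000), ("store", 1, 10000), ("data", 1, 10000),
   ("entries", 1, 10000), ("record", 1, 10000), ("block", 1, 10000), ("chunk", 1, 10000),
   ("session", 2, 1000), ("connection", 2, 1000), ("client", 2, 1000), ("peer", 2, 1000),
   ("node", 2, 1000), ("member", 2, 1000), ("subscription", 2, 1000), ("subscriber", 2, 1000),
   ("limiter", 2, 1000),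
   ("strategy", 3, 200), ("registry", 3, 200), ("handler", 3, 200), ("processor", 3, 200),
   ("provider", 3, 200), ("factory", 3, 200), ("resolver", 3, 200), ("plugin", 3, 200),
   ("config", 4, 500), ("setting", 4, 500), ("option", 4, 500), ("param", 4, 500),
   ("feature", 4, 500), ("toggle", 4, 500), ("policy", 4, 500), ("rule", 4, 500),
   ("tenant", 4, 500),
   ("job", 5, 1000), ("task", 5, 1000), ("queue", 5, 1000), ("pending", 5, 1000),
   ("active", 5, 1000), ("running", 5, 1000), ("scheduled", 5, 1000)]

-- one loop step: keep the match with minimal priority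
def pvStep (name : String) (best : Option (Int × Int)) (e : String × Int × Int) : Option (Int × Int) :=
  if PySem.Str.isIn e.1 name then
    match best with
    | none => some e.2
    | some p => if e.2.1 < p.1 then some e.2 else best
  else best

def get_capacity_alt (field_name : String) : Int :=
  let name := PySem.Str.lower field_name
  match pvKeywordInfo.foldl (pvStep name) none with
  | some p => p.2
  | none => 1000

-- ===== PRECONDITION & SPEC =====
def Spec_get_capacity (field_name : String) (out : Int) : Prop := out = get_capacity_alt field_name
instance (field_name : String) (out : Int) : Decidable (Spec_get_capacity field_name out) := by unfold Spec_get_capacity; infer_instance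

-- ===== CLAIM (what is proved, stated in full; the proofs are below) =====
def Claim_equal_get_capacity : Prop := ∀ (field_name : String), Dom_get_capacity field_name → Spec_get_capacity field_name (get_capacity field_name)

-- ===== LEMMAS AND PROOFS =====

-- folding one tier's group (all entries sharing priority t and capacity c)
theorem pv_fold_group (name : String) (t c : Int) (kws : List String) (best : Option (Int × Int)) :
    List.foldl (pvStep name) best (kws.map (fun k => (k, t, c))) =
      if kws.any (fun k => PySem.Str.isIn k name) then
        (match best with
         | none => some (t, c)
         | some p => if t < p.1 then some (t, c) else best)
      else best := by
  induction kws generalizing best with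
  | nil => simp
  | cons k ks ih =>
    simp only [List.map_cons, List.foldl_cons, List.any_cons]
    have hstep : pvStep name best (k, t, c) =
        if PySem.Str.isIn k name then
          (match best with
           | none => some (t, c)
           | some p => if t < p.1 then some (t, c) else best)
        else best := rfl
    rw [hstep]
    obtain hk | hk := Bool.eq_false_or_eq_true (PySem.Str.isIn k name)
    · simp only [hk, Bool.true_or, if_true]
      rw [ih]
      cases best with
      | none => simp
      | some p =>
        dsimp only
        by_cases ht : t < p.1
        · rw [if_pos ht]
          simp
        · rw [if_neg ht]
          simp [ht]
    · simp only [hk, Bool.false_or, Bool.false_eq_true, if_false]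
      exact ih best

theorem pv_flat_decomp : pvKeywordInfo =
    (["metric", "counter", "stat", "monitor", "perf", "telemetry", "analytics"].map (fun k => (k, (0:Int), (5000:Int)))) ++
    (["cache", "index", "store", "data", "entries", "record", "block", "chunk"].map (fun k => (k, (1:Int), (10000:Int)))) ++
    (["session", "connection", "client", "peer", "node", "member", "subscription", "subscriber", "limiter"].map (fun k => (k, (2:Int), (1000:Int)))) ++
    (["strategy", "registry", "handler", "processor", "provider", "factory", "resolver", "plugin"].map (fun k => (k, (3:Int), (200:Int)))) ++
    (["config", "setting", "option", "param", "feature", "toggle", "policy", "rule", "tenant"].map (fun k => (k, (4:Int), (500:Int)))) ++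
    (["job", "task", "queue", "pending", "active", "running", "scheduled"].map (fun k => (k, (5:Int), (1000:Int)))) := by
  rfl

-- ===== VERDICT (by name: the statement is the Claim_ definition above) =====
theorem get_capacity_spec : Claim_equal_get_capacity := by
  intro field_name _
  simp only [Spec_get_capacity, get_capacity, get_capacity_alt]
  rw [pv_flat_decomp]
  simp only [List.foldl_append, pv_fold_group]
  obtain h1 | h1 := Bool.eq_false_or_eq_true (["metric", "counter", "stat", "monitor", "perf", "telemetry", "analytics"].any (fun k => PySem.Str.isIn k (PySem.Str.lower field_name))) <;>
  obtain h2 | h2 := Bool.eq_false_or_eq_true (["cache", "index", "store", "data", "entries", "record", "block", "chunk"].any (fun k => PySem.Str.isIn k (PySem.Str.lower field_name))) <;>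
  obtain h3 | h3 := Bool.eq_false_or_eq_true (["session", "connection", "client", "peer", "node", "member", "subscription", "subscriber", "limiter"].any (fun k => PySem.Str.isIn k (PySem.Str.lower field_name))) <;>
  obtain h4 | h4 := Bool.eq_false_or_eq_true (["strategy", "registry", "handler", "processor", "provider", "factory", "resolver", "plugin"].any (fun k => PySem.Str.isIn k (PySem.Str.lower field_name))) <;>
  obtain h5 | h5 := Bool.eq_false_or_eq_true (["config", "setting", "option", "param", "feature", "toggle", "policy", "rule", "tenant"].any (fun k => PySem.Str.isIn k (PySem.Str.lower field_name))) <;>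
  obtain h6 | h6 := Bool.eq_false_or_eq_true (["job", "task", "queue", "pending", "active", "running", "scheduled"].any (fun k => PySem.Str.isIn k (PySem.Str.lower field_name))) <;>
  simp only [h1, h2, h3, h4, h5, h6] <;> rfl
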